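-- pv_equiv track=rewrite | github.com/heaps-smart/heaps-smart | merge_csv_data.py | get_tags_from_category
-- ===== SOURCE A (Python) =====
-- def get_tags_from_category(category):
--     if not category:
--         return ["Other"]
--
--     # Handle multiple categories separated by semicolon
--     categories = [cat.strip() for cat in category.split(';')]
--     tags = []
--
--     for cat in categories:
--         if 'Password Management' in cat:
--             tags.append('Security')
--         elif 'Data Management' in cat:
--             tags.append('Database')
--         elif 'Project Management' in cat:
--             tags.append('Project Management')
--         elif 'Design' in cat:
--             tags.append('Design')
--         elif 'Social Media Management' in cat:
--             tags.append('Marketing')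
--         elif 'AI-Assistant' in cat:
--             tags.append('AI')
--         elif 'Fundraising' in cat:
--             tags.append('Fundraising')
--         elif 'CRM' in cat:
--             tags.append('CRM')
--         elif 'Website Builder' in cat:
--             tags.append('Website Builder')
--         elif 'Mapping' in cat:
--             tags.append('Mapping')
--         elif 'Communication' in cat:
--             tags.append('Communication')
--         elif 'Form Builder' in cat:
--             tags.append('Form Builder')
--         elif 'Knowledge Management' in cat:
--             tags.append('Cloud Storage')
--         elif 'Event Management' in cat:
--             tags.append('Events')
--         elif 'Email Management' in cat:
--             tags.append('Marketing')
--         elif 'Transcription' in cat: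
--             tags.append('Transcription')
--         elif 'Content Management' in cat:
--             tags.append('Content Management')
--         elif 'Payments' in cat:
--             tags.append('Payments')
--         elif 'Data Visualisation' in cat:
--             tags.append('Data')
--         elif 'Video Hosting' in cat:
--             tags.append('Video Hosting')
--         elif 'Website CMS' in cat:
--             tags.append('Website CMS')
--         elif 'Automation' in cat:
--             tags.append('Automation')
--         elif 'Collaboration' in cat:
--             tags.append('Collaboration')
--         else:
--             tags.append(cat)
--
--     return tags if tags else ["Other"]
-- ===== SOURCE B (Python) =====
-- PATTERNS = [
--     ('Password Management', 'Security'),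
--     ('Data Management', 'Database'),
--     ('Project Management', 'Project Management'),
--     ('Design', 'Design'),
--     ('Social Media Management', 'Marketing'),
--     ('AI-Assistant', 'AI'),
--     ('Fundraising', 'Fundraising'),
--     ('CRM', 'CRM'),
--     ('Website Builder', 'Website Builder'),
--     ('Mapping', 'Mapping'),
--     ('Communication', 'Communication'),
--     ('Form Builder', 'Form Builder'),
--     ('Knowledge Management', 'Cloud Storage'),
--     ('Event Management', 'Events'),
--     ('Email Management', 'Marketing'),
--     ('Transcription', 'Transcription'),
--     ('Content Management', 'Content Management'),
--     ('Payments', 'Payments'),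
--     ('Data Visualisation', 'Data'),
--     ('Video Hosting', 'Video Hosting'),
--     ('Website CMS', 'Website CMS'),
--     ('Automation', 'Automation'),
--     ('Collaboration', 'Collaboration'),
-- ]
--
--
-- def get_tags_from_category(category):
--     if not category:
--         return ["Other"]
--     toks = [c.strip() for c in category.split(';')]
--     # Sieve with the loops inverted: sweep the patterns (highest priority first)
--     # over ALL tokens at once; a token keeps the tag of the first sweep that hits it.
--     slots = [None] * len(toks)
--     for sub, tag in PATTERNS:
--         slots = [tag if slot is None and sub in tok else slot
--                  for slot, tok in zip(slots, toks)]
--     out = [slot if slot is not None else tok for slot, tok in zip(slots, toks)]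
--     return out or ["Other"]
-- ===== Notes on version B (the rewrite author's own statement) =====
-- stated objective: alternative
-- what changed: Inverts the loop nesting: instead of A's per-token 23-branch elif chain, B sweeps each (substring, tag) pattern in priority order over ALL tokens at once, filling a slot list (first sweep to hit a token wins), then fills unhit slots with the token itself.
import Mathlib
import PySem

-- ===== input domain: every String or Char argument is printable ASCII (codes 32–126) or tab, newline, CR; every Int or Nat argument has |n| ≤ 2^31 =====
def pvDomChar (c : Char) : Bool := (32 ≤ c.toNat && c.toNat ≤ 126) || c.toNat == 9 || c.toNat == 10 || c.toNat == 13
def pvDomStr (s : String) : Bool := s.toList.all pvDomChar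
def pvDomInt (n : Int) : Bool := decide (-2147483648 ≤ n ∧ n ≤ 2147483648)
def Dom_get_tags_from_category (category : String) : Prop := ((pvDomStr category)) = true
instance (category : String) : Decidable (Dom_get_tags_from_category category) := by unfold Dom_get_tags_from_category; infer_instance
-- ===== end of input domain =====

-- B inverts the loop nesting: each (substring, tag) pattern is swept in priority order over all tokens
-- at once into a slot list (first hit wins), instead of A's per-token 23-branch elif chain (alternative; same cost).

-- ===== PORT A =====
-- sep ";" is a nonempty literal, so split? is always `some`; .getD [] only discharges the Option
def get_tags_from_category (category : String) : List String :=
  if category == "" then ["Other"]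
  else
    let categories := ((PySem.Str.split? category ";").getD []).map PySem.Str.strip
    let tags := categories.foldl (fun tags cat =>
      tags ++ [
    if PySem.Str.isIn "Password Management" cat then "Security"
        else if PySem.Str.isIn "Data Management" cat then "Database"
        else if PySem.Str.isIn "Project Management" cat then "Project Management"
        else if PySem.Str.isIn "Design" cat then "Design"
        else if PySem.Str.isIn "Social Media Management" cat then "Marketing"
        else if PySem.Str.isIn "AI-Assistant" cat then "AI"
        else if PySem.Str.isIn "Fundraising" cat then "Fundraising"
        else if PySem.Str.isIn "CRM" cat then "CRM"
        else if PySem.Str.isIn "Website Builder" cat then "Website Builder"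
        else if PySem.Str.isIn "Mapping" cat then "Mapping"
        else if PySem.Str.isIn "Communication" cat then "Communication"
        else if PySem.Str.isIn "Form Builder" cat then "Form Builder"
        else if PySem.Str.isIn "Knowledge Management" cat then "Cloud Storage"
        else if PySem.Str.isIn "Event Management" cat then "Events"
        else if PySem.Str.isIn "Email Management" cat then "Marketing"
        else if PySem.Str.isIn "Transcription" cat then "Transcription"
        else if PySem.Str.isIn "Content Management" cat then "Content Management"
        else if PySem.Str.isIn "Payments" cat then "Payments"
        else if PySem.Str.isIn "Data Visualisation" cat then "Data"
        else if PySem.Str.isIn "Video Hosting" cat then "Video Hosting"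
        else if PySem.Str.isIn "Website CMS" cat then "Website CMS"
        else if PySem.Str.isIn "Automation" cat then "Automation"
        else if PySem.Str.isIn "Collaboration" cat then "Collaboration"
        else cat
      ]) []
    if tags == [] then ["Other"] else tags

-- ===== PORT B =====
def pvPatterns : List (String × String) := [
  ("Password Management", "Security"),
  ("Data Management", "Database"),
  ("Project Management", "Project Management"),
  ("Design", "Design"),
  ("Social Media Management", "Marketing"),
  ("AI-Assistant", "AI"),
  ("Fundraising", "Fundraising"),
  ("CRM", "CRM"),
  ("Website Builder", "Website Builder"),
  ("Mapping", "Mapping"),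
  ("Communication", "Communication"),
  ("Form Builder", "Form Builder"),
  ("Knowledge Management", "Cloud Storage"),
  ("Event Management", "Events"),
  ("Email Management", "Marketing"),
  ("Transcription", "Transcription"),
  ("Content Management", "Content Management"),
  ("Payments", "Payments"),
  ("Data Visualisation", "Data"),
  ("Video Hosting", "Video Hosting"),
  ("Website CMS", "Website CMS"),
  ("Automation", "Automation"),
  ("Collaboration", "Collaboration")
]

def get_tags_from_category_alt (category : String) : List String :=
  if category == "" then ["Other"]
  else
    let toks := ((PySem.Str.split? category ";").getD []).map PySem.Str.strip
    let slots0 := List.replicate toks.length (none : Option String)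
    -- the pattern-sweep loop: 'slots = [tag if slot is None and sub in tok else slot for slot, tok in zip(slots, toks)]'
    let slots := pvPatterns.foldl (fun sl p =>
      (sl.zip toks).map (fun q => if q.1 == none && PySem.Str.isIn p.1 q.2 then some p.2 else q.1)) slots0
    let out := (slots.zip toks).map (fun q => match q.1 with | some t => t | none => q.2)
    if out == [] then ["Other"] else out

-- ===== PRECONDITION & SPEC =====
def Spec_get_tags_from_category (category : String) (out : List String) : Prop := out = get_tags_from_category_alt category
instance (category : String) (out : List String) : Decidable (Spec_get_tags_from_category category out) := by unfold Spec_get_tags_from_category; infer_instance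

-- ===== CLAIM (what is proved, stated in full; the proofs are below) =====
def Claim_equal_get_tags_from_category : Prop := ∀ (category : String), Dom_get_tags_from_category category → Spec_get_tags_from_category category (get_tags_from_category category)

-- ===== LEMMAS AND PROOFS =====

-- zipping the result of a zip-map with the same right list again
theorem pv_zipmap {α β γ : Type} (l1 : List α) (l2 : List β) (f : α × β → γ)
    (h : l1.length = l2.length) :
    ((l1.zip l2).map f).zip l2 = (l1.zip l2).map (fun q => (f q, q.2)) := by
  induction l1 generalizing l2 with
  | nil => simp
  | cons a t ih =>
    cases l2 with
    | nil => simp at h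
    | cons b t2 => simp_all

-- the pattern sweep acts pointwise on (slot, token) pairs
theorem pv_sieve (ps : List (String × String)) (toks : List String) :
    ∀ (slots : List (Option String)), slots.length = toks.length →
    ps.foldl (fun sl p =>
        (sl.zip toks).map (fun q => if q.1 == none && PySem.Str.isIn p.1 q.2 then some p.2 else q.1)) slots
      = (slots.zip toks).map
          (fun q => ps.foldl (fun s p => if s == none && PySem.Str.isIn p.1 q.2 then some p.2 else s) q.1) := by
  induction ps with
  | nil =>
    intro slots h
    simp only [List.foldl_nil]
    exact (List.map_fst_zip h.le).symm
  | cons p ps ih =>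
    intro slots h
    rw [List.foldl_cons,
      ih _ (by simp [h]),
      pv_zipmap _ _ _ h, List.map_map]
    simp only [Function.comp_def, List.foldl_cons]

-- a filled slot is never overwritten
theorem pv_fold_some (ps : List (String × String)) (v : String) (t : String) :
    ps.foldl (fun s p => if s == none && PySem.Str.isIn p.1 t then some p.2 else s) (some v) = some v := by
  induction ps with
  | nil => rfl
  | cons p ps ih => simpa using ih

-- recursive first-match form of the per-slot fold
def pvFm (t : String) : List (String × String) → Option String
  | [] => none
  | p :: ps => if PySem.Str.isIn p.1 t then some p.2 else pvFm t ps

theorem pv_fold_fm (t : String) (ps : List (String × String)) :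
    ps.foldl (fun s p => if s == none && PySem.Str.isIn p.1 t then some p.2 else s) none = pvFm t ps := by
  induction ps with
  | nil => rfl
  | cons p ps ih =>
    simp only [List.foldl_cons, pvFm]
    by_cases hp : PySem.Str.isIn p.1 t = true
    · rw [if_pos (by simpa using hp), if_pos hp]
      exact pv_fold_some ps p.2 t
    · rw [if_neg (by simpa using hp), if_neg hp]
      exact ih

-- first match over the pattern table (default: the token itself) IS A's elif chain
theorem pv_fm_chain (t : String) :
    (match pvFm t pvPatterns with | some x => x | none => t) =
      (if PySem.Str.isIn "Password Management" t then "Security"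
        else if PySem.Str.isIn "Data Management" t then "Database"
        else if PySem.Str.isIn "Project Management" t then "Project Management"
        else if PySem.Str.isIn "Design" t then "Design"
        else if PySem.Str.isIn "Social Media Management" t then "Marketing"
        else if PySem.Str.isIn "AI-Assistant" t then "AI"
        else if PySem.Str.isIn "Fundraising" t then "Fundraising"
        else if PySem.Str.isIn "CRM" t then "CRM"
        else if PySem.Str.isIn "Website Builder" t then "Website Builder"
        else if PySem.Str.isIn "Mapping" t then "Mapping"
        else if PySem.Str.isIn "Communication" t then "Communication"
        else if PySem.Str.isIn "Form Builder" t then "Form Builder"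
        else if PySem.Str.isIn "Knowledge Management" t then "Cloud Storage"
        else if PySem.Str.isIn "Event Management" t then "Events"
        else if PySem.Str.isIn "Email Management" t then "Marketing"
        else if PySem.Str.isIn "Transcription" t then "Transcription"
        else if PySem.Str.isIn "Content Management" t then "Content Management"
        else if PySem.Str.isIn "Payments" t then "Payments"
        else if PySem.Str.isIn "Data Visualisation" t then "Data"
        else if PySem.Str.isIn "Video Hosting" t then "Video Hosting"
        else if PySem.Str.isIn "Website CMS" t then "Website CMS"
        else if PySem.Str.isIn "Automation" t then "Automation"
        else if PySem.Str.isIn "Collaboration" t then "Collaboration"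
        else t) := by
  have hmatch : (match pvFm t pvPatterns with | some x => x | none => t) = (pvFm t pvPatterns).getD t := by
    cases pvFm t pvPatterns <;> rfl
  rw [hmatch]
  simp only [pvPatterns, pvFm]
  simp only [apply_ite (fun o : Option String => o.getD t), Option.getD_some, Option.getD_none]

-- the initial all-None slot list zipped with the tokens
theorem pv_replicate_zip (toks : List String) :
    (List.replicate toks.length (none : Option String)).zip toks
      = toks.map (fun t => ((none : Option String), t)) := by
  induction toks with
  | nil => rfl
  | cons t ts ih => simpa [List.replicate_succ] using ih

-- ===== VERDICT (by name: the statement is the Claim_ definition above) =====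
set_option maxHeartbeats 1600000 in
theorem get_tags_from_category_spec : Claim_equal_get_tags_from_category := by
  intro c _
  unfold Spec_get_tags_from_category get_tags_from_category get_tags_from_category_alt
  by_cases h : c == ""
  · simp [h]
  · simp only [h, if_false, Bool.false_eq_true]
    rw [PySem.List.foldl_append_singleton_eq_map]
    simp only [List.nil_append]
    refine congrArg (fun t => if t == ([] : List String) then ["Other"] else t) ?_
    set toks := ((PySem.Str.split? c ";").getD []).map PySem.Str.strip with htoks
    rw [pv_sieve pvPatterns toks _ (by simp),
      pv_zipmap _ _ _ (by simp), pv_replicate_zip]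
    simp only [List.map_map, Function.comp_def]
    refine List.map_congr_left (fun a _ => ?_)
    rw [pv_fold_fm]
    exact (pv_fm_chain a).symm
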